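-- pv_equiv track=rewrite | github.com/neumond/minpiler | mind.py | link_program
-- ===== SOURCE A (Python) =====
-- def link_program(lines):
--     labels = {}
--     program = []
--     for line in lines:
--         if line.startswith('label '):
--             labels[line.split(' ', 1)[1]] = len(program)
--         else:
--             program.append(line)
--
--     for index, line in enumerate(program):
--         if line.startswith('jump '):
--             _, label, cmd = line.split(' ', 2)
--             program[index] = f'jump {labels[label]} {cmd}'
--
--     if labels and max(labels.values()) >= len(program):
--         program.append('end')
--
--     return program
-- ===== SOURCE B (Python) =====
-- def link_program(lines):
--     # One-pass backpatching assembler: jumps are resolved as soon as they are seen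
--     # (or left raw), and every label (re)definition patches all recorded references.
--     labels = {}
--     out = []
--     refs = {}  # label name -> list of (index in out, cmd) for every jump referencing it
--     for line in lines:
--         if line.startswith('label '):
--             name = line.split(' ', 1)[1]
--             pos = len(out)
--             labels[name] = pos
--             for i, cmd in refs.get(name, []):
--                 out[i] = f'jump {pos} {cmd}'
--         elif line.startswith('jump '):
--             _, label, cmd = line.split(' ', 2)
--             out.append(f'jump {labels[label]} {cmd}' if label in labels else line)
--             refs.setdefault(label, []).append((len(out) - 1, cmd))
--         else:
--             out.append(line)
--     if labels and max(labels.values()) >= len(out):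
--         out.append('end')
--     return out
-- ===== Notes on version B (the rewrite author's own statement) =====
-- stated objective: alternative
-- what changed: A links in two passes (build the full label table, then re-scan the program rewriting every jump); B is a one-pass backpatching assembler: each jump is resolved immediately if its label is already known or emitted raw and recorded in a per-label reference list, and each label (re)definition patches all recorded references, so no second scan over the program exists.
import Mathlib
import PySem

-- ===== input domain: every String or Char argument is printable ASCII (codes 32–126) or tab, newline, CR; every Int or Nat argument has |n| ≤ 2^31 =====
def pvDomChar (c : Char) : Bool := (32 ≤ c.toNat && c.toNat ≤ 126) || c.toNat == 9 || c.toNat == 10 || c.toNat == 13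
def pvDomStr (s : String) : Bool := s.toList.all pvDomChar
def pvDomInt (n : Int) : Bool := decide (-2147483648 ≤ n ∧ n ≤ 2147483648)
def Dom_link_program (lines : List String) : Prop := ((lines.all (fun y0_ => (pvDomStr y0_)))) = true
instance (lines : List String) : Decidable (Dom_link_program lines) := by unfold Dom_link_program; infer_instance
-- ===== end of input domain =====

-- B replaces A's two-pass linker (label table, then rewrite scan) by a one-pass backpatching
-- assembler that patches recorded jump references at each label definition (objective: alternative).

-- ===== PORT A =====
-- shared split helpers: line.split(' ', 1)[1] and the three fields of line.split(' ', 2);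
-- the .getD defaults are only reachable outside Pre_ (malformed jump lines).
def pvLabelOf (line : String) : String :=
  ((PySem.Str.splitMax? line " " 1).getD []).getD 1 ""

def pvJmpLab (line : String) : String :=
  ((PySem.Str.splitMax? line " " 2).getD []).getD 1 ""

def pvJmpCmd (line : String) : String :=
  ((PySem.Str.splitMax? line " " 2).getD []).getD 2 ""

def pvRender (v : Int) (cmd : String) : String :=
  "jump " ++ PySem.Int.toStr v ++ " " ++ cmd

def pvJumpRewrite (labels : PySem.Dict String Int) (line : String) : String :=
  pvRender ((labels.get? (pvJmpLab line)).getD 0) (pvJmpCmd line)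

def link_program (lines : List String) : List String :=
  -- first loop: build labels dict and program list together
  let st := lines.foldl
    (fun (st : PySem.Dict String Int × List String) line =>
      if PySem.Str.startswith line "label " then
        (st.1.insert (pvLabelOf line) (st.2.length : Int), st.2)
      else
        (st.1, st.2 ++ [line]))
    (PySem.Dict.empty, [])
  let labels := st.1
  -- second loop: for index, line in enumerate(program): in-place update program[index]
  let program := (PySem.List.enumerate st.2 0).foldl
    (fun prog (e : Int × String) =>
      if PySem.Str.startswith e.2 "jump " then prog.set e.1.toNat (pvJumpRewrite labels e.2)
      else prog)
    st.2
  if !labels.items.isEmpty &&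
      ((PySem.List.max? labels.values (fun v => v)).getD 0 ≥ (program.length : Int)) then
    program ++ ["end"]
  else program

-- ===== PORT B =====
-- state: (labels, out, refs); refs maps a label name to the (index, cmd) of every jump seen so far
def pvBStep (st : PySem.Dict String Int × List String × PySem.Dict String (List (Int × String)))
    (line : String) :
    PySem.Dict String Int × List String × PySem.Dict String (List (Int × String)) :=
  if PySem.Str.startswith line "label " then
    let name := pvLabelOf line
    let pos : Int := st.2.1.length
    -- for i, cmd in refs.get(name, []): out[i] = f'jump {pos} {cmd}'
    let out := (st.2.2.getD name []).foldl
      (fun o (ic : Int × String) => o.set ic.1.toNat (pvRender pos ic.2)) st.2.1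
    (st.1.insert name pos, out, st.2.2)
  else if PySem.Str.startswith line "jump " then
    let lab := pvJmpLab line
    let nl := match st.1.get? lab with
      | some v => pvRender v (pvJmpCmd line)
      | none => line
    (st.1, st.2.1 ++ [nl],
      st.2.2.insert lab ((st.2.2.getD lab []) ++ [((st.2.1.length : Int), pvJmpCmd line)]))
  else (st.1, st.2.1 ++ [line], st.2.2)

def link_program_alt (lines : List String) : List String :=
  let st := lines.foldl pvBStep (PySem.Dict.empty, [], PySem.Dict.empty)
  if !st.1.items.isEmpty &&
      ((PySem.List.max? st.1.values (fun v => v)).getD 0 ≥ (st.2.1.length : Int)) then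
    st.2.1 ++ ["end"]
  else st.2.1

-- ===== PRECONDITION & SPEC =====
def pvLabelNames (lines : List String) : List String :=
  (lines.filter (fun l => PySem.Str.startswith l "label ")).map pvLabelOf

-- Pre_ excludes exactly the inputs where the Python A raises: a jump line with fewer than two
-- spaces (ValueError on unpacking split(' ', 2)) or whose label is never defined (KeyError).
def Pre_link_program (lines : List String) : Prop :=
  ∀ l ∈ lines, PySem.Str.startswith l "jump " = true →
    2 ≤ PySem.Str.count l " " ∧ pvJmpLab l ∈ pvLabelNames lines

instance (lines : List String) : Decidable (Pre_link_program lines) := by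
  unfold Pre_link_program; infer_instance

def pvWitness_link_program : List String :=
  ["jump done always", "label top", "set x 1", "jump top always", "label done"]

def Spec_link_program (lines : List String) (out : List String) : Prop := out = link_program_alt lines
instance (lines : List String) (out : List String) : Decidable (Spec_link_program lines out) := by unfold Spec_link_program; infer_instance

-- ===== CLAIM =====
def Claim_equal_link_program : Prop := ∀ (lines : List String), Dom_link_program lines → Pre_link_program lines → Spec_link_program lines (link_program lines)

-- ===== LEMMAS AND PROOFS =====

-- a jump line, rewritten with the labels known so far (raw if its label is still unknown)
def pvG (labels : PySem.Dict String Int) (l : String) : String :=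
  if PySem.Str.startswith l "jump " then
    match labels.get? (pvJmpLab l) with
    | some v => pvRender v (pvJmpCmd l)
    | none => l
  else l

-- the reference list B's refs dict records for a given label over an emitted prefix
def pvRefsOf (ps : List String) (name : String) (k : Int) : List (Int × String) :=
  match ps with
  | [] => []
  | l :: t =>
      (if PySem.Str.startswith l "jump " && pvJmpLab l == name then [(k, pvJmpCmd l)] else [])
        ++ pvRefsOf t name (k + 1)

-- the canonical label-table fold (counter of emitted lines)
def pvCFold (lines : List String) (st : PySem.Dict String Int × Int) :
    PySem.Dict String Int × Int :=
  lines.foldl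
    (fun st line =>
      if PySem.Str.startswith line "label " then (st.1.insert (pvLabelOf line) st.2, st.2)
      else (st.1, st.2 + 1))
    st

theorem refsOf_append (ps : List String) (x name : String) (k : Int) :
    pvRefsOf (ps ++ [x]) name k
      = pvRefsOf ps name k
        ++ (if PySem.Str.startswith x "jump " && pvJmpLab x == name
            then [(k + ps.length, pvJmpCmd x)] else []) := by
  induction ps generalizing k with
  | nil => simp [pvRefsOf]
  | cons a t ih =>
    simp only [List.cons_append, pvRefsOf, ih (k + 1), List.append_assoc]
    have : k + 1 + (t.length : Int) = k + ((t.length : Int) + 1) := by ring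
    simp [this]

theorem refsOf_bound (ps : List String) (name : String) (k : Int) :
    ∀ e ∈ pvRefsOf ps name k, k ≤ e.1 ∧ e.1 < k + ps.length := by
  induction ps generalizing k with
  | nil => simp [pvRefsOf]
  | cons a t ih =>
    intro e he
    simp only [pvRefsOf, List.mem_append] at he
    rcases he with he | he
    · rcases (by split_ifs at he <;> simp_all : e = (k, pvJmpCmd a)) with rfl
      constructor
      · simp
      · simp only [List.length_cons]; push_cast; omega
    · have := ih (k + 1) e he
      simp only [List.length_cons]
      push_cast
      omega

theorem foldl_set_append (L : List (Int × String)) (f : Int × String → String) :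
    ∀ (xs ys : List String), (∀ e ∈ L, e.1.toNat < xs.length) →
    L.foldl (fun o ic => o.set ic.1.toNat (f ic)) (xs ++ ys)
      = (L.foldl (fun o ic => o.set ic.1.toNat (f ic)) xs) ++ ys := by
  induction L with
  | nil => intro xs ys _; rfl
  | cons e t ih =>
    intro xs ys h
    simp only [List.foldl_cons]
    rw [List.set_append_left _ _ (h e (by simp)), ih]
    intro e' he'
    rw [List.length_set]
    exact h e' (by simp [he'])

theorem set_append_cons {α : Type} (q : List α) (x v : α) (p : List α) :
    (q ++ x :: p).set q.length v = q ++ v :: p := by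
  induction q with
  | nil => simp
  | cons a t ih => simp [ih]

-- patching the recorded references rewrites the mapped prefix to the updated label table
theorem pvPatch (ps : List String) (labels : PySem.Dict String Int) (name : String) (pos : Int) :
    (pvRefsOf ps name 0).foldl
      (fun o (ic : Int × String) => o.set ic.1.toNat (pvRender pos ic.2))
      (ps.map (pvG labels))
    = ps.map (pvG (labels.insert name pos)) := by
  induction ps using List.reverseRecOn with
  | nil => simp [pvRefsOf]
  | append_singleton ps x ih =>
    rw [refsOf_append, List.map_append, List.foldl_append, foldl_set_append _ _ _ _ ?bound, ih]
    case bound =>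
      intro e he
      have h := refsOf_bound ps name 0 e he
      simp only [List.length_map]
      omega
    by_cases hc : (PySem.Str.startswith x "jump " && pvJmpLab x == name) = true
    · have hj : PySem.Str.startswith x "jump " = true := by
        simp only [Bool.and_eq_true] at hc; exact hc.1
      have hl : pvJmpLab x = name := by
        simp only [Bool.and_eq_true, beq_iff_eq] at hc; exact hc.2
      rw [if_pos hc]
      simp only [List.foldl_cons, List.foldl_nil, List.map_append, List.map_cons, List.map_nil]
      have hlen : ((0 : Int) + ps.length).toNat = (ps.map (pvG (labels.insert name pos))).length := by
        simp
      rw [hlen]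
      have := set_append_cons (ps.map (pvG (labels.insert name pos)))
        (pvG labels x) (pvRender pos (pvJmpCmd x)) []
      rw [show (ps.map (pvG (labels.insert name pos)) ++ [pvG labels x])
            = ps.map (pvG (labels.insert name pos)) ++ pvG labels x :: [] from rfl, this]
      have hg : pvG (labels.insert name pos) x = pvRender pos (pvJmpCmd x) := by
        simp only [pvG, hj, hl, PySem.Dict.get?_insert_self, if_true]
      rw [hg]
    · rw [if_neg hc]
      simp only [List.foldl_nil, List.map_append, List.map_cons, List.map_nil]
      have hg : pvG labels x = pvG (labels.insert name pos) x := by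
        by_cases hj : PySem.Str.startswith x "jump " = true
        · have hl : pvJmpLab x ≠ name := by
            intro h
            exact hc (by simp only [hj, h, beq_self_eq_true, Bool.and_self])
          simp only [pvG, PySem.Dict.get?_insert_of_ne _ _ hl]
        · simp only [Bool.not_eq_true] at hj
          simp only [pvG, hj, Bool.false_eq_true, if_false]
      rw [hg]

-- the main invariant of B's single fold
theorem pvMain (lines : List String) :
    ∀ (labels : PySem.Dict String Int) (ps : List String)
      (refs : PySem.Dict String (List (Int × String))),
    (∀ name, refs.getD name [] = pvRefsOf ps name 0) →
    (lines.foldl pvBStep (labels, ps.map (pvG labels), refs)).1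
        = (pvCFold lines (labels, (ps.length : Int))).1
    ∧ (lines.foldl pvBStep (labels, ps.map (pvG labels), refs)).2.1
        = (ps ++ lines.filter (fun l => !PySem.Str.startswith l "label ")).map
            (pvG (pvCFold lines (labels, (ps.length : Int))).1) := by
  induction lines with
  | nil => intro labels ps refs _; simp [pvCFold]
  | cons x xs ih =>
    intro labels ps refs H
    by_cases hlab : PySem.Str.startswith x "label " = true
    · -- label line: patch, insert, recurse
      have hstep : pvBStep (labels, ps.map (pvG labels), refs) x
          = (labels.insert (pvLabelOf x) (ps.length : Int),
             ps.map (pvG (labels.insert (pvLabelOf x) (ps.length : Int))), refs) := by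
        simp only [pvBStep, hlab, if_true, List.length_map, H (pvLabelOf x)]
        rw [pvPatch]
      have hc : pvCFold (x :: xs) (labels, (ps.length : Int))
          = pvCFold xs (labels.insert (pvLabelOf x) (ps.length : Int), (ps.length : Int)) := by
        simp only [pvCFold, List.foldl_cons, hlab, if_true]
      rw [List.foldl_cons, hstep, hc,
        List.filter_cons_of_neg (by rw [hlab]; simp)]
      exact ih _ ps refs H
    · have hlab' : PySem.Str.startswith x "label " = false := by
        cases hb : PySem.Str.startswith x "label " <;> simp_all
      have hfilter : List.filter (fun l => !PySem.Str.startswith l "label ") (x :: xs)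
          = x :: List.filter (fun l => !PySem.Str.startswith l "label ") xs := by
        rw [List.filter_cons_of_pos (by rw [hlab']; rfl)]
      have hlen1 : (((ps ++ [x]).length : Nat) : Int) = (ps.length : Int) + 1 := by simp
      have hc : pvCFold (x :: xs) (labels, (ps.length : Int))
          = pvCFold xs (labels, ((ps ++ [x]).length : Int)) := by
        simp only [pvCFold, List.foldl_cons, hlab', Bool.false_eq_true, if_false, hlen1]
      by_cases hj : PySem.Str.startswith x "jump " = true
      · -- jump line
        have hnl : (match labels.get? (pvJmpLab x) with
            | some v => pvRender v (pvJmpCmd x)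
            | none => x) = pvG labels x := by
          simp only [pvG, hj, if_true]
        have hstep : pvBStep (labels, ps.map (pvG labels), refs) x
            = (labels, (ps ++ [x]).map (pvG labels),
               refs.insert (pvJmpLab x)
                 ((refs.getD (pvJmpLab x) []) ++ [((ps.length : Int), pvJmpCmd x)])) := by
          simp only [pvBStep, hlab', hj, Bool.false_eq_true, if_false, if_true, hnl, List.length_map,
            List.map_append, List.map_cons, List.map_nil]
        have H' : ∀ name,
            (refs.insert (pvJmpLab x)
              ((refs.getD (pvJmpLab x) []) ++ [((ps.length : Int), pvJmpCmd x)])).getD name []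
            = pvRefsOf (ps ++ [x]) name 0 := by
          intro name
          rw [PySem.Dict.getD_insert, refsOf_append]
          by_cases hne : name = pvJmpLab x
          · subst hne
            rw [if_pos rfl, H _, if_pos (by rw [hj]; simp)]
            simp
          · rw [if_neg hne, H name,
              if_neg (by rw [hj]; simp only [Bool.true_and, beq_iff_eq]
                         exact fun h => hne h.symm)]
            simp
        rw [List.foldl_cons, hstep, hc, hfilter]
        have := ih labels (ps ++ [x]) _ H'
        simpa using this
      · -- plain line
        have hj' : PySem.Str.startswith x "jump " = false := by
          cases hb : PySem.Str.startswith x "jump " <;> simp_all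
        have hgx : pvG labels x = x := by
          simp only [pvG, hj', Bool.false_eq_true, if_false]
        have hstep : pvBStep (labels, ps.map (pvG labels), refs) x
            = (labels, (ps ++ [x]).map (pvG labels), refs) := by
          simp only [pvBStep, hlab', hj', Bool.false_eq_true, if_false, List.map_append, List.map_cons,
            List.map_nil, hgx]
        have H' : ∀ name, refs.getD name [] = pvRefsOf (ps ++ [x]) name 0 := by
          intro name
          rw [refsOf_append, if_neg (by rw [hj']; simp), H name]
          simp
        rw [List.foldl_cons, hstep, hc, hfilter]
        have := ih labels (ps ++ [x]) refs H'
        simpa using this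

-- A's first loop equals the counter fold paired with the filtered program list.
theorem pass1_eq (lines : List String)
    (d : PySem.Dict String Int) (p : List String) :
    lines.foldl
      (fun (st : PySem.Dict String Int × List String) line =>
        if PySem.Str.startswith line "label " then
          (st.1.insert (pvLabelOf line) (st.2.length : Int), st.2)
        else (st.1, st.2 ++ [line]))
      (d, p)
    = ((pvCFold lines (d, (p.length : Int))).1,
       p ++ lines.filter (fun l => !PySem.Str.startswith l "label ")) := by
  induction lines generalizing d p with
  | nil => simp [pvCFold]
  | cons x xs ih =>
    rw [List.foldl_cons]
    by_cases h : PySem.Str.startswith x "label " = true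
    · rw [if_pos h, ih]
      rw [List.filter_cons_of_neg (by rw [h]; simp)]
      have hc : pvCFold (x :: xs) (d, (p.length : Int))
          = pvCFold xs (d.insert (pvLabelOf x) (p.length : Int), (p.length : Int)) := by
        simp only [pvCFold, List.foldl_cons, h, if_true]
      rw [hc]
    · have h' : PySem.Str.startswith x "label " = false := by
        cases hb : PySem.Str.startswith x "label " <;> simp_all
      rw [if_neg (by rw [h']; simp), ih d (p ++ [x])]
      have hlen : (((p ++ [x]).length : Nat) : Int) = (p.length : Int) + 1 := by simp
      have hc : pvCFold (x :: xs) (d, (p.length : Int))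
          = pvCFold xs (d, ((p ++ [x]).length : Int)) := by
        simp only [pvCFold, List.foldl_cons, h', Bool.false_eq_true, if_false, hlen]
      rw [hc, List.filter_cons_of_pos (by rw [h']; rfl)]
      simp

-- A's in-place enumerate loop is the map of the pointwise rewrite.
theorem pass2A_eq (f : String → String) (p q : List String) :
    (PySem.List.enumerate p (q.length : Int)).foldl
      (fun prog (e : Int × String) =>
        if PySem.Str.startswith e.2 "jump " then prog.set e.1.toNat (f e.2) else prog)
      (q ++ p)
    = q ++ p.map (fun l => if PySem.Str.startswith l "jump " then f l else l) := by
  induction p generalizing q with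
  | nil => simp [PySem.List.enumerate_nil]
  | cons x xs ih =>
    rw [PySem.List.enumerate_cons, List.foldl_cons]
    have hstep :
        (if PySem.Str.startswith x "jump " then
          (q ++ x :: xs).set ((q.length : Int)).toNat (f x) else (q ++ x :: xs))
        = (q ++ [if PySem.Str.startswith x "jump " then f x else x]) ++ xs := by
      by_cases h : PySem.Str.startswith x "jump " = true
      · rw [if_pos h, if_pos h, Int.toNat_natCast, set_append_cons]; simp
      · rw [if_neg h, if_neg h]; simp
    rw [hstep]
    have hlen : ((q.length : Int) + 1)
        = (((q ++ [if PySem.Str.startswith x "jump " then f x else x]).length : Nat) : Int) := by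
      simp
    rw [hlen, ih]
    simp

-- labels once defined stay defined through the counter fold
theorem cfold_mono (lines : List String) :
    ∀ (d : PySem.Dict String Int) (c : Int) (name : String),
    (d.get? name).isSome → (((pvCFold lines (d, c)).1).get? name).isSome := by
  induction lines with
  | nil => intro d c name h; simpa [pvCFold] using h
  | cons x xs ih =>
    intro d c name h
    by_cases hl : PySem.Str.startswith x "label " = true
    · have hc : pvCFold (x :: xs) (d, c) = pvCFold xs (d.insert (pvLabelOf x) c, c) := by
        simp only [pvCFold, List.foldl_cons, hl, if_true]
      rw [hc]
      apply ih
      rw [PySem.Dict.get?_insert]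
      split_ifs with he
      · simp
      · exact h
    · have hl' : PySem.Str.startswith x "label " = false := by
        cases hb : PySem.Str.startswith x "label " <;> simp_all
      have hc : pvCFold (x :: xs) (d, c) = pvCFold xs (d, c + 1) := by
        simp only [pvCFold, List.foldl_cons, hl', Bool.false_eq_true, if_false]
      rw [hc]; exact ih _ _ _ h

theorem cfold_contains (lines : List String) :
    ∀ (d : PySem.Dict String Int) (c : Int) (name : String),
    name ∈ pvLabelNames lines → (((pvCFold lines (d, c)).1).get? name).isSome := by
  induction lines with
  | nil => intro d c name h; simp [pvLabelNames] at h
  | cons x xs ih =>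
    intro d c name h
    by_cases hl : PySem.Str.startswith x "label " = true
    · have hc : pvCFold (x :: xs) (d, c) = pvCFold xs (d.insert (pvLabelOf x) c, c) := by
        simp only [pvCFold, List.foldl_cons, hl, if_true]
      rw [hc]
      have h' : name = pvLabelOf x ∨ name ∈ pvLabelNames xs := by
        unfold pvLabelNames at h
        rw [List.filter_cons_of_pos (p := fun l => PySem.Str.startswith l "label ")
          (a := x) hl] at h
        simpa [pvLabelNames] using h
      rcases h' with he | h'
      · subst he
        exact cfold_mono xs _ c _ (by rw [PySem.Dict.get?_insert_self]; simp)
      · exact ih _ _ _ h'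
    · have hl' : PySem.Str.startswith x "label " = false := by
        cases hb : PySem.Str.startswith x "label " <;> simp_all
      have hc : pvCFold (x :: xs) (d, c) = pvCFold xs (d, c + 1) := by
        simp only [pvCFold, List.foldl_cons, hl', Bool.false_eq_true, if_false]
      rw [hc]
      have h' : name ∈ pvLabelNames xs := by
        unfold pvLabelNames at h
        rw [List.filter_cons_of_neg (p := fun l => PySem.Str.startswith l "label ")
          (a := x) hl] at h
        exact h
      exact ih _ _ _ h'

-- ===== VERDICT =====
theorem link_program_spec : Claim_equal_link_program := by
  intro lines _ hpre
  unfold Spec_link_program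
  simp only [link_program, link_program_alt]
  rw [pass1_eq lines PySem.Dict.empty []]
  have hmain := pvMain lines PySem.Dict.empty [] PySem.Dict.empty
    (by intro name; simp [pvRefsOf])
  simp only [List.map_nil, List.length_nil, Nat.cast_zero, List.nil_append] at hmain
  obtain ⟨h1, h2⟩ := hmain
  have hmap :
      (lines.filter (fun l => !PySem.Str.startswith l "label ")).map
        (fun l => if PySem.Str.startswith l "jump " then
          pvJumpRewrite (pvCFold lines (PySem.Dict.empty, 0)).1 l else l)
      = (lines.filter (fun l => !PySem.Str.startswith l "label ")).map
          (pvG (pvCFold lines (PySem.Dict.empty, 0)).1) := by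
    apply List.map_congr_left
    intro l hl
    by_cases hj : PySem.Str.startswith l "jump " = true
    · have hmem : l ∈ lines := List.mem_of_mem_filter hl
      have hname := (hpre l hmem hj).2
      have hsome := cfold_contains lines PySem.Dict.empty 0 (pvJmpLab l) hname
      obtain ⟨v, hv⟩ := Option.isSome_iff_exists.mp hsome
      rw [if_pos hj]
      simp only [pvG, hj, if_true, pvJumpRewrite, hv, Option.getD_some]
    · have hj' : PySem.Str.startswith l "jump " = false := by
        cases hb : PySem.Str.startswith l "jump " <;> simp_all
      rw [if_neg (by rw [hj']; simp)]
      simp only [pvG, hj', Bool.false_eq_true, if_false]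
  have hq := pass2A_eq
    (pvJumpRewrite (pvCFold lines (PySem.Dict.empty, 0)).1)
    (lines.filter (fun l => !PySem.Str.startswith l "label ")) []
  simp only [List.length_nil, Nat.cast_zero, List.nil_append] at hq
  simp only [List.length_nil, Nat.cast_zero, List.nil_append]
  rw [hq, hmap, h1, h2]
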